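-- pv_equiv track=rewrite | github.com/kasteelion/promptbuilder | logic/style_parser.py | parse_color_schemes
-- ===== SOURCE A (Python) =====
-- def parse_color_schemes(content: str):
--     """Parse color schemes from markdown content."""
--     schemes = {}
--     current = None
--     colors = {}
--
--     for line in content.splitlines():
--         line = line.strip()
--         if not line:
--             continue
--
--         if line.startswith("## "):
--             if current:
--                 schemes[current] = colors
--             current = line[3:].strip()
--             colors = {}
--         elif line.startswith("- **primary:**"):
--             colors["primary_color"] = line.split("**primary:**", 1)[1].strip()
--         elif line.startswith("- **secondary:**"):
--             colors["secondary_color"] = line.split("**secondary:**", 1)[1].strip()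
--         elif line.startswith("- **accent:**"):
--             colors["accent"] = line.split("**accent:**", 1)[1].strip()
--         elif line.startswith("- **team:**"):
--             colors["team"] = line.split("**team:**", 1)[1].strip()
--
--     if current:
--         schemes[current] = colors
--
--     return schemes
-- ===== SOURCE B (Python) =====
-- def parse_color_schemes(content: str):
--     """Parse color schemes from markdown content (two-pass: section, then parse)."""
--     # Pass 1: split stripped non-empty lines into (header, body-lines) sections.
--     sections = []
--     name = None
--     body = []
--     for raw in content.splitlines():
--         ln = raw.strip()
--         if not ln:
--             continue
--         if ln.startswith("## "):
--             if name is not None: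
--                 sections.append((name, body))
--             name = ln[3:].strip()
--             body = []
--         elif name is not None:
--             body.append(ln)
--     if name is not None:
--         sections.append((name, body))
--
--     # Pass 2: build each scheme's colors from its body; drop empty header names.
--     fields = [
--         ("- **primary:**", "**primary:**", "primary_color"),
--         ("- **secondary:**", "**secondary:**", "secondary_color"),
--         ("- **accent:**", "**accent:**", "accent"),
--         ("- **team:**", "**team:**", "team"),
--     ]
--     schemes = {}
--     for name, body in sections:
--         if not name:
--             continue
--         colors = {}
--         for ln in body:
--             for prefix, marker, key in fields:
--                 if ln.startswith(prefix):
--                     colors[key] = ln.split(marker, 1)[1].strip()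
--                     break
--         schemes[name] = colors
--     return schemes
-- ===== Notes on version B (the rewrite author's own statement) =====
-- stated objective: alternative
-- what changed: Replaces A's single streaming fold over (schemes, current, colors) state by a two-pass decomposition: first split the stripped non-empty lines into (header, body) sections, then build each scheme's color dict from its body via a field table.
import Mathlib
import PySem

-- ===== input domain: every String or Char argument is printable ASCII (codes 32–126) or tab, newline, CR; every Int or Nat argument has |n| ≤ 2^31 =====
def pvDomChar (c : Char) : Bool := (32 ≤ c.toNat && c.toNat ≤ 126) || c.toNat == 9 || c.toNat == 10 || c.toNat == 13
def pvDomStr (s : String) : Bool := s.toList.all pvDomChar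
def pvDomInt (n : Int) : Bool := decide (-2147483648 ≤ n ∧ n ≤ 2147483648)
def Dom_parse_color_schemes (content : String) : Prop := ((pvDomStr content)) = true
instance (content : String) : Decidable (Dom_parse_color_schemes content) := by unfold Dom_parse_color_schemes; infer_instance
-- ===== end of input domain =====

-- B replaces A's single streaming fold over (schemes, current, colors) state by a two-pass
-- decomposition (split lines into sections first, then parse each section's colors); 'alternative' objective.

-- shared helper: line.split(marker, 1)[1].strip()  (both Pythons compute exactly this expression)
def pvSplitVal (line marker : String) : String :=
  PySem.Str.strip ((((PySem.Str.splitMax? line marker 1).getD []).getD 1 ""))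

-- ===== PORT A =====
-- A's loop state: (schemes, current, colors)
def pvStateA := PySem.Dict String (PySem.Dict String String) × Option String × PySem.Dict String String

-- the body of A's for-loop after `line = line.strip(); if not line: continue`
def pvCoreA (st : pvStateA) (line : String) : pvStateA :=
  if PySem.Str.startswith line "## " then
    ((match st.2.1 with
      | none => st.1
      | some c => if c = "" then st.1 else st.1.insert c st.2.2),
     some (PySem.Str.strip (PySem.Str.slice line (some 3) none)), PySem.Dict.empty)
  else if PySem.Str.startswith line "- **primary:**" then
    (st.1, st.2.1, st.2.2.insert "primary_color" (pvSplitVal line "**primary:**"))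
  else if PySem.Str.startswith line "- **secondary:**" then
    (st.1, st.2.1, st.2.2.insert "secondary_color" (pvSplitVal line "**secondary:**"))
  else if PySem.Str.startswith line "- **accent:**" then
    (st.1, st.2.1, st.2.2.insert "accent" (pvSplitVal line "**accent:**"))
  else if PySem.Str.startswith line "- **team:**" then
    (st.1, st.2.1, st.2.2.insert "team" (pvSplitVal line "**team:**"))
  else st

def pvStepA (st : pvStateA) (raw : String) : pvStateA :=
  let line := PySem.Str.strip raw
  if line = "" then st else pvCoreA st line

-- A's code after the loop: `if current: schemes[current] = colors`
def pvFinA (st : pvStateA) : PySem.Dict String (PySem.Dict String String) :=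
  match st.2.1 with
  | none => st.1
  | some c => if c = "" then st.1 else st.1.insert c st.2.2

def parse_color_schemes (content : String) : List (String × List (String × String)) :=
  (pvFinA ((PySem.Str.splitlines content).foldl pvStepA
      (PySem.Dict.empty, none, PySem.Dict.empty))).items.map (fun p => (p.1, p.2.items))

-- ===== PORT B =====
-- (bullet prefix, split marker, output key) table of B's second pass
def pvFields : List (String × String × String) :=
  [("- **primary:**", "**primary:**", "primary_color"),
   ("- **secondary:**", "**secondary:**", "secondary_color"),
   ("- **accent:**", "**accent:**", "accent"),
   ("- **team:**", "**team:**", "team")]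

-- B's pass-1 loop state: (sections, name, body)
def pvStateB := List (String × List String) × Option String × List String

def pvSectStep (st : pvStateB) (line : String) : pvStateB :=
  if PySem.Str.startswith line "## " then
    ((match st.2.1 with | none => st.1 | some n => st.1 ++ [(n, st.2.2)]),
     some (PySem.Str.strip (PySem.Str.slice line (some 3) none)), ([] : List String))
  else match st.2.1 with
    | none => st
    | some _ => (st.1, st.2.1, st.2.2 ++ [line])

-- B's code after the pass-1 loop: `if name is not None: sections.append((name, body))`
def pvSecFin (st : pvStateB) : List (String × List String) :=
  match st.2.1 with | none => st.1 | some n => st.1 ++ [(n, st.2.2)]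

def pvSections (content : String) : List (String × List String) :=
  pvSecFin ((((PySem.Str.splitlines content).map PySem.Str.strip).filter (fun l => l ≠ "")).foldl
    pvSectStep ([], none, []))

-- the inner loop of B's pass 2: one body line into the colors dict
def pvColStep (colors : PySem.Dict String String) (line : String) : PySem.Dict String String :=
  match pvFields.find? (fun f => PySem.Str.startswith line f.1) with
  | some f => colors.insert f.2.2 (pvSplitVal line f.2.1)
  | none => colors

def pvColorsOf (body : List String) : PySem.Dict String String :=
  body.foldl pvColStep PySem.Dict.empty

def pvBuildB (secs : List (String × List String)) : PySem.Dict String (PySem.Dict String String) :=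
  secs.foldl (fun schemes s => if s.1 = "" then schemes else schemes.insert s.1 (pvColorsOf s.2))
    PySem.Dict.empty

def parse_color_schemes_alt (content : String) : List (String × List (String × String)) :=
  (pvBuildB (pvSections content)).items.map (fun p => (p.1, p.2.items))

-- ===== PRECONDITION & SPEC =====
def Spec_parse_color_schemes (content : String) (out : List (String × List (String × String))) : Prop := out = parse_color_schemes_alt content
instance (content : String) (out : List (String × List (String × String))) : Decidable (Spec_parse_color_schemes content out) := by unfold Spec_parse_color_schemes; infer_instance

-- ===== CLAIM (what is proved, stated in full; the proofs are below) =====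
def Claim_equal_parse_color_schemes : Prop := ∀ (content : String), Dom_parse_color_schemes content → Spec_parse_color_schemes content (parse_color_schemes content)

-- ===== LEMMAS AND PROOFS =====

-- B's finalization expressed on a pass-1 state
def pvFinB (st : pvStateB) : PySem.Dict String (PySem.Dict String String) :=
  pvBuildB (pvSecFin st)

-- A's strip-and-skip loop over raw lines is the core loop over the stripped non-empty lines
lemma pv_foldl_stepA_eq (l : List String) (st : pvStateA) :
    l.foldl pvStepA st = ((l.map PySem.Str.strip).filter (fun s => s ≠ "")).foldl pvCoreA st := by
  induction l generalizing st with
  | nil => rfl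
  | cons x xs ih =>
    simp only [List.foldl_cons, List.map_cons, List.filter_cons, pvStepA]
    by_cases h : PySem.Str.strip x = "" <;> simp [h, ih]

lemma pv_buildB_append (secs : List (String × List String)) (n : String) (body : List String) :
    pvBuildB (secs ++ [(n, body)]) =
      if n = "" then pvBuildB secs else (pvBuildB secs).insert n (pvColorsOf body) := by
  simp [pvBuildB, List.foldl_append]

lemma pv_colorsOf_append (body : List String) (line : String) :
    pvColorsOf (body ++ [line]) = pvColStep (pvColorsOf body) line := by
  simp [pvColorsOf, List.foldl_append]

lemma pv_coreA_header (sch : PySem.Dict String (PySem.Dict String String)) (cur : Option String)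
    (col : PySem.Dict String String) (line : String)
    (hh : PySem.Str.startswith line "## " = true) :
    pvCoreA (sch, cur, col) line =
      ((match cur with
        | none => sch
        | some c => if c = "" then sch else sch.insert c col),
       some (PySem.Str.strip (PySem.Str.slice line (some 3) none)), PySem.Dict.empty) := by
  unfold pvCoreA
  rw [if_pos hh]

lemma pv_sect_header (secs : List (String × List String)) (cur : Option String)
    (body : List String) (line : String)
    (hh : PySem.Str.startswith line "## " = true) :
    pvSectStep (secs, cur, body) line =
      ((match cur with | none => secs | some n => secs ++ [(n, body)]),
       some (PySem.Str.strip (PySem.Str.slice line (some 3) none)), ([] : List String)) := by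
  unfold pvSectStep
  rw [if_pos hh]

lemma pv_coreA_nonheader (sch : PySem.Dict String (PySem.Dict String String)) (cur : Option String)
    (col : PySem.Dict String String) (line : String)
    (hh : ¬ PySem.Str.startswith line "## " = true) :
    pvCoreA (sch, cur, col) line = (sch, cur, pvColStep col line) := by
  unfold pvCoreA pvColStep pvFields
  rw [if_neg hh]
  simp only [List.find?]
  by_cases h1 : PySem.Str.startswith line "- **primary:**" = true
  · rw [if_pos h1, h1]
  rw [if_neg h1, Bool.not_eq_true] at *
  rw [h1]
  by_cases h2 : PySem.Str.startswith line "- **secondary:**" = true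
  · rw [if_pos h2, h2]
  rw [if_neg h2, Bool.not_eq_true] at *
  rw [h2]
  by_cases h3 : PySem.Str.startswith line "- **accent:**" = true
  · rw [if_pos h3, h3]
  rw [if_neg h3, Bool.not_eq_true] at *
  rw [h3]
  by_cases h4 : PySem.Str.startswith line "- **team:**" = true
  · rw [if_pos h4, h4]
  rw [if_neg h4, Bool.not_eq_true] at *
  rw [h4]

lemma pv_sect_nonheader (secs : List (String × List String)) (cur : Option String)
    (body : List String) (line : String)
    (hh : ¬ PySem.Str.startswith line "## " = true) :
    pvSectStep (secs, cur, body) line =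
      (secs, cur, match cur with | none => body | some _ => body ++ [line]) := by
  unfold pvSectStep
  rw [if_neg hh]
  cases cur <;> rfl

-- main invariant: A's core fold and B's section fold finalize to the same dict
lemma pv_main (S : List String) (sch : PySem.Dict String (PySem.Dict String String))
    (cur : Option String) (col : PySem.Dict String String)
    (secs : List (String × List String)) (body : List String)
    (hcol : ∀ n, cur = some n → col = pvColorsOf body)
    (hsch : sch = pvBuildB secs) :
    pvFinA (S.foldl pvCoreA (sch, cur, col)) = pvFinB (S.foldl pvSectStep (secs, cur, body)) := by
  induction S generalizing sch cur col secs body with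
  | nil =>
    cases cur with
    | none => simp [pvFinA, pvFinB, pvSecFin, hsch]
    | some n =>
      have hc := hcol n rfl
      simp only [List.foldl_nil, pvFinA, pvFinB, pvSecFin, pv_buildB_append, hsch, hc]
  | cons line S ih =>
    simp only [List.foldl_cons]
    by_cases hh : PySem.Str.startswith line "## " = true
    · rw [pv_coreA_header _ _ _ _ hh, pv_sect_header _ _ _ _ hh]
      apply ih
      · intro n hn; rfl
      · cases cur with
        | none => exact hsch
        | some c =>
          have hc := hcol c rfl
          simp only [pv_buildB_append, hsch, hc]
    · rw [pv_coreA_nonheader _ _ _ _ hh, pv_sect_nonheader _ _ _ _ hh]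
      cases cur with
      | none =>
        apply ih
        · intro n hn; cases hn
        · exact hsch
      | some n =>
        apply ih
        · intro m hm
          cases hm
          rw [pv_colorsOf_append, hcol n rfl]
        · exact hsch

-- ===== VERDICT (by name: the statement is the Claim_ definition above) =====
theorem parse_color_schemes_spec : Claim_equal_parse_color_schemes := by
  intro content _
  show parse_color_schemes content = parse_color_schemes_alt content
  unfold parse_color_schemes parse_color_schemes_alt pvSections
  rw [pv_foldl_stepA_eq]
  rw [pv_main _ _ _ _ [] [] (fun n hn => by cases hn) (by rfl)]
  rfl
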